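-- pv_equiv track=rewrite | github.com/RainbowDragon/ACSL | Python/Contest 2/2022 - 2023/BinaryCountingJunior.py | findLastBinary
-- ===== SOURCE A (Python) =====
-- def findLastBinary(s):
--
--     concatenated_str = ""
--     for k in range(len(s)):
--         binary_str = getBinaryStringForChar(s[k])
--         concatenated_str += binary_str
--
--     number = 0
--     found = False
--     while not found:
--         number_str = getBinaryStringForInt(number)
--         if number_str in concatenated_str:
--             number += 1
--         else:
--             number -= 1
--             found = True
--
--     return number
--
-- def getBinaryStringForChar(c):
--
--     char_str = getBinaryStringForInt(ord(c))
--     len_char_str = len(char_str)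
--     if len_char_str < 8:
--         char_str = ("0" * (8 - len_char_str)) + char_str
--
--     return char_str
--
-- def getBinaryStringForInt(num):
--
--     return str(bin(num)[2:])
-- ===== SOURCE B (Python) =====
-- def _windowText(s, m):
--     # distinct m-character windows of s (first-occurrence order), plus the tail of
--     # m-1 characters, each expanded to its bit string, joined with a separator
--     grams = dict.fromkeys(zip(*(s[j:] for j in range(m))))
--     parts = ["".join(format(ord(c), "08b") for c in g) for g in grams]
--     parts.append("".join(format(ord(c), "08b") for c in s[max(len(s) - m + 1, 0):]))
--     return "\n".join(parts)
--
--
-- def findLastBinary(s):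
--     # a k-bit window of the concatenation lies inside (k+6)//8 + 1 adjacent
--     # 8-bit blocks, so it suffices to search the (deduplicated) window text
--     n = 0
--     m = 0
--     text = ""
--     while True:
--         b = format(n, "b")
--         need = (len(b) + 6) // 8 + 1
--         if need > m:
--             m = need
--             text = _windowText(s, m)
--         if b in text:
--             n += 1
--         else:
--             return n - 1
-- ===== Notes on version B (the rewrite author's own statement) =====
-- stated objective: faster
-- what changed: Instead of scanning the whole concatenated bit string once per candidate number, B deduplicates the m-character windows of s (any k-bit substring lies within m = (k+6)//8+1 adjacent 8-bit blocks) and searches each candidate in the much smaller newline-joined text of distinct windows.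
import Mathlib
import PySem

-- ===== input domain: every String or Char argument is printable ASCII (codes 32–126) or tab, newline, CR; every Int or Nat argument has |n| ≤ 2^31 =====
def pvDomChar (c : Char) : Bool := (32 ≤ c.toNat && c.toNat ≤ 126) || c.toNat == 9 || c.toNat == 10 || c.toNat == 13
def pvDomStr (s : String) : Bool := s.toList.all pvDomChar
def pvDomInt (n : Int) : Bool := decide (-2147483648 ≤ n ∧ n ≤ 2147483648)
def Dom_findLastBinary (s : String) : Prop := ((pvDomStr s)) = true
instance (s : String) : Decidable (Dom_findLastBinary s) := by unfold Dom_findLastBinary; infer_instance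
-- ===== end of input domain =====

-- B searches each candidate's bit string in a small deduplicated text (the distinct m-character
-- windows of s, m = (k+6)//8+1 adjacent blocks, into which any k-bit window fits) instead of A's
-- scan of the whole concatenated bit string per candidate; measured faster on large inputs.

-- ===== PORT A =====

-- bin(n)[2:] for n ≥ 0 (PySem has no `bin`; exact recursive binary printer, shared by both ports)
def pyBin (n : Nat) : List Char :=
  if n ≤ 1 then [if n = 1 then '1' else '0']
  else pyBin (n / 2) ++ [if n % 2 = 1 then '1' else '0']
decreasing_by exact Nat.div_lt_self (by omega) (by omega)

-- termination-measure facts for both ports' while loops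
theorem pyBin_length (n : Nat) : (pyBin n).length = Nat.log2 n + 1 := by
  induction n using Nat.strong_induction_on with
  | _ n ih =>
    unfold pyBin
    split
    · rename_i h
      have h0 : Nat.log2 n = 0 := by interval_cases n <;> rfl
      simp [h0]
    · rename_i h
      rw [List.length_append, ih (n / 2) (Nat.div_lt_self (by omega) (by omega))]
      have hl : Nat.log2 n = Nat.log2 (n / 2) + 1 := by
        rw [Nat.log2_eq_log_two, Nat.log2_eq_log_two, Nat.log_div_base]
        have := Nat.log_pos (b := 2) (by omega) (by omega : 2 ≤ n)
        omega
      simp [hl]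

theorem pyBin_lt_of_length_le {n k : Nat} (h : (pyBin n).length ≤ k) : n < 2 ^ k := by
  rcases Nat.eq_zero_or_pos n with h0 | h0
  · subst h0; positivity
  · rw [pyBin_length] at h
    exact (Nat.log2_lt (by omega)).1 (by omega)

-- getBinaryStringForChar: bin(ord(c)) left-padded with '0' to width 8
def getBinaryStringForChar (c : Char) : List Char :=
  let char_str := pyBin c.toNat
  if char_str.length < 8 then List.replicate (8 - char_str.length) '0' ++ char_str
  else char_str

-- the `while not found` loop of A: first n whose binary string is not a substring, minus one
def loopA (cat : List Char) (n : Nat) : Int :=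
  if h : PySem.Chars.isIn (pyBin n) cat then loopA cat (n + 1) else (n : Int) - 1
termination_by 2 ^ cat.length + 1 - n
decreasing_by
  have hinf := (PySem.Chars.isIn_iff_infix _ _).1 h
  have := pyBin_lt_of_length_le hinf.length_le
  omega

def findLastBinary (s : String) : Int :=
  let cs := s.toList
  let cat := (PySem.List.pyRange 0 (cs.length : Int)).foldl
    (fun acc k => acc ++ getBinaryStringForChar (PySem.List.pyGetD cs k ' ')) ([] : List Char)
  loopA cat 0

-- ===== PORT B =====

-- format(n, '08b')
def bin08 (n : Nat) : List Char :=
  let b := pyBin n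
  List.replicate (8 - b.length) '0' ++ b

-- the concatenated bit string (a value of the proofs; B itself never builds it)
def catOf (s : List Char) : List Char := (s.map (fun c => bin08 c.toNat)).flatten

-- the m-character windows of s, as zip(*(s[j:] for j in range(m))) produces them
def mGrams (s : List Char) (m : Nat) : List (List Char) :=
  (List.range (s.length + 1 - m)).map (fun i => (s.drop i).take m)

-- the parts of _windowText: distinct windows (first-occurrence order), then the tail
def windowParts (s : List Char) (m : Nat) : List (List Char) :=
  (PySem.List.dedup (mGrams s m)).map (fun g => (g.map (fun c => bin08 c.toNat)).flatten)
    ++ [((s.drop (s.length - (m - 1))).map (fun c => bin08 c.toNat)).flatten]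

-- _windowText(s, m) = "\n".join(parts)
def windowText (s : List Char) (m : Nat) : List Char :=
  PySem.Chars.join ['\n'] (windowParts s m)

-- ----- facts cited by loopB's termination proof -----

theorem pyBin_ne_nil (n : Nat) : pyBin n ≠ [] := by
  have := pyBin_length n
  intro h
  rw [h] at this
  simp at this

theorem mem_pyBin {n : Nat} {c : Char} (h : c ∈ pyBin n) : c = '0' ∨ c = '1' := by
  induction n using Nat.strong_induction_on with
  | _ n ih =>
    unfold pyBin at h
    split at h
    · rcases List.mem_singleton.1 h with rfl
      split <;> simp
    · rcases List.mem_append.1 h with h | h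
      · exact ih (n / 2) (Nat.div_lt_self (by omega) (by omega)) h
      · rcases List.mem_singleton.1 h with rfl
        split <;> simp

theorem newline_not_mem_pyBin (n : Nat) : '\n' ∉ pyBin n := by
  intro h
  rcases mem_pyBin h with h | h <;> simp at h

theorem flatten_map_infix {l₁ l₂ : List Char} (f : Char → List Char) (h : l₁ <:+: l₂) :
    (l₁.map f).flatten <:+: (l₂.map f).flatten := by
  obtain ⟨a, b, rfl⟩ := h
  exact ⟨(a.map f).flatten, (b.map f).flatten, by simp⟩

theorem part_infix_cat {s : List Char} {m : Nat} {p : List Char}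
    (hp : p ∈ windowParts s m) : p <:+: catOf s := by
  unfold windowParts at hp
  rcases List.mem_append.1 hp with hp | hp
  · obtain ⟨g, hg, rfl⟩ := List.mem_map.1 hp
    have hg' := (PySem.List.mem_dedup _ _).1 hg
    rw [mGrams, List.mem_map] at hg'
    obtain ⟨i, _, rfl⟩ := hg'
    exact flatten_map_infix _
      (((s.drop i).take_prefix m).isInfix.trans (s.drop_suffix i).isInfix)
  · rcases List.mem_singleton.1 hp with rfl
    exact flatten_map_infix _ (s.drop_suffix _).isInfix

-- a separator-free infix of a ++ c :: b lies in a or in b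
theorem infix_of_infix_append_sep {t a b : List Char} {c : Char} (hc : c ∉ t)
    (h : t <:+: a ++ c :: b) : t <:+: a ∨ t <:+: b := by
  obtain ⟨u, v, huv⟩ := h
  rw [List.append_assoc] at huv
  by_cases h1 : u.length + t.length ≤ a.length
  · left
    have htake : u ++ t = a.take (u.length + t.length) := by
      have := congrArg (List.take (u.length + t.length)) huv
      rw [List.take_append_of_le_length h1] at this
      rw [List.take_append, List.take_of_length_le (by omega), Nat.add_sub_cancel_left,
        List.take_append, List.take_of_length_le (le_refl _), Nat.sub_self, List.take_zero,
        List.append_nil] at this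
      exact this
    exact ⟨u, a.drop (u.length + t.length), by rw [htake, List.take_append_drop]⟩
  · by_cases h2 : a.length + 1 ≤ u.length
    · right
      have hd := congrArg (List.drop (a.length + 1)) huv
      rw [List.drop_append_of_le_length h2,
        show a ++ c :: b = (a ++ [c]) ++ b by simp,
        show a.length + 1 = (a ++ [c]).length by simp,
        List.drop_left] at hd
      exact ⟨u.drop (a ++ [c]).length, v, by rw [List.append_assoc]; exact hd⟩
    · exfalso
      apply hc
      have hidx := congrArg (fun l => l[a.length]?) huv
      simp only at hidx
      rw [List.getElem?_append_right (by omega : u.length ≤ a.length),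
        List.getElem?_append_left (by omega : a.length - u.length < t.length),
        List.getElem?_append_right (le_refl a.length), Nat.sub_self] at hidx
      simp only [List.getElem?_cons_zero] at hidx
      exact List.mem_of_getElem? hidx

theorem infix_part_of_infix_join {t : List Char} {parts : List (List Char)}
    (ht : t ≠ []) (hc : '\n' ∉ t) (h : t <:+: PySem.Chars.join ['\n'] parts) :
    ∃ p ∈ parts, t <:+: p := by
  induction parts with
  | nil =>
    rw [PySem.Chars.join_nil] at h
    exact absurd (List.eq_nil_of_infix_nil h) ht
  | cons p rest ih =>
    cases rest with
    | nil =>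
      rw [PySem.Chars.join_singleton] at h
      exact ⟨p, by simp, h⟩
    | cons q rest' =>
      rw [PySem.Chars.join_cons_cons] at h
      rw [show p ++ ['\n'] ++ PySem.Chars.join ['\n'] (q :: rest')
          = p ++ '\n' :: PySem.Chars.join ['\n'] (q :: rest') by simp] at h
      rcases infix_of_infix_append_sep hc h with h | h
      · exact ⟨p, by simp, h⟩
      · obtain ⟨p', hp', ht'⟩ := ih h
        exact ⟨p', by simp [hp'], ht'⟩

-- B's membership test only accepts genuine substrings of the concatenation
theorem windowText_sound {s t : List Char} {m : Nat} (ht : t ≠ []) (hc : '\n' ∉ t)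
    (h : t <:+: windowText s m) : t <:+: catOf s := by
  obtain ⟨p, hp, htp⟩ := infix_part_of_infix_join ht hc h
  exact htp.trans (part_infix_cat hp)

-- the `while True` loop of B; the cached text is the pure value _windowText(s, m) of the state
def loopB (s : List Char) (n : Nat) (m : Nat) : Int :=
  if ((pyBin n).length + 6) / 8 + 1 > m then loopB s n (((pyBin n).length + 6) / 8 + 1)
  else if h : PySem.Chars.isIn (pyBin n) (windowText s m) then loopB s (n + 1) m
  else (n : Int) - 1
termination_by (2 ^ (catOf s).length + 1 - n, ((pyBin n).length + 6) / 8 + 1 - m)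
decreasing_by
  · exact Prod.Lex.right _ (by omega)
  · apply Prod.Lex.left
    have hinf := (PySem.Chars.isIn_iff_infix _ _).1 h
    have hcat := windowText_sound (pyBin_ne_nil n) (newline_not_mem_pyBin n) hinf
    have := pyBin_lt_of_length_le hcat.length_le
    omega

def findLastBinary_alt (s : String) : Int :=
  loopB s.toList 0 0

-- ===== PRECONDITION & SPEC =====
def Spec_findLastBinary (s : String) (out : Int) : Prop := out = findLastBinary_alt s
instance (s : String) (out : Int) : Decidable (Spec_findLastBinary s out) := by unfold Spec_findLastBinary; infer_instance

-- ===== CLAIM (what is proved, stated in full; the proofs are below) =====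
def Claim_equal_findLastBinary : Prop := ∀ (s : String), Dom_findLastBinary s → Spec_findLastBinary s (findLastBinary s)

-- ===== LEMMAS AND PROOFS =====

theorem getB_eq_bin08 (c : Char) : getBinaryStringForChar c = bin08 c.toNat := by
  unfold getBinaryStringForChar bin08
  dsimp only
  split
  · rfl
  · rename_i h
    have h0 : 8 - (pyBin c.toNat).length = 0 := by omega
    simp [h0]

theorem cat_eq (s : String) :
    (PySem.List.pyRange 0 (s.toList.length : Int)).foldl
      (fun acc k => acc ++ getBinaryStringForChar (PySem.List.pyGetD s.toList k ' ')) ([] : List Char)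
    = catOf s.toList := by
  rw [PySem.List.foldl_pyRange_zero_pyGetD' s.toList ' '
      (fun acc c => acc ++ getBinaryStringForChar c) []]
  rw [PySem.List.foldl_append_eq_flatMap getBinaryStringForChar s.toList []]
  have hfn : getBinaryStringForChar = fun c => bin08 c.toNat := funext getB_eq_bin08
  simp [catOf, List.flatMap_def, hfn]

theorem bin08_length_ge (n : Nat) : 8 ≤ (bin08 n).length := by
  unfold bin08
  dsimp only
  rw [List.length_append, List.length_replicate]
  omega

theorem infix_join_of_mem {p : List Char} {parts : List (List Char)} (hp : p ∈ parts) :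
    p <:+: PySem.Chars.join ['\n'] parts := by
  induction parts with
  | nil => cases hp
  | cons q rest ih =>
    cases rest with
    | nil =>
      rcases List.mem_singleton.1 hp with rfl
      rw [PySem.Chars.join_singleton]
    | cons r rest' =>
      rw [PySem.Chars.join_cons_cons]
      rcases List.mem_cons.1 hp with rfl | hp
      · exact ((List.prefix_append p _).trans (List.prefix_append _ _)).isInfix
      · exact (ih hp).trans (List.suffix_append _ _).isInfix

theorem flatten_take_prefix (l : List (List Char)) (q : Nat) :
    (l.take q).flatten <+: l.flatten := by
  conv_rhs => rw [← List.take_append_drop q l]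
  rw [List.flatten_append]
  exact List.prefix_append _ _

theorem length_flatten_take_ge {Bs : List (List Char)} (hB : ∀ b ∈ Bs, 8 ≤ b.length)
    {q : Nat} (hq : q ≤ Bs.length) : 8 * q ≤ ((Bs.take q).flatten).length := by
  induction Bs generalizing q with
  | nil => simp at hq; omega
  | cons b rest ih =>
    cases q with
    | zero => simp
    | succ q' =>
      simp only [List.take_succ_cons, List.flatten_cons, List.length_append]
      have h1 := hB b (by simp)
      have h2 := ih (fun x hx => hB x (by simp [hx])) (by simpa using hq)
      omega

theorem prefix_flatten_take {Bs : List (List Char)} {p : List Char}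
    (hB : ∀ b ∈ Bs, 8 ≤ b.length) (hp : p <+: Bs.flatten) {q : Nat}
    (hq : p.length ≤ 8 * q) : p <+: (Bs.take q).flatten := by
  by_cases hql : Bs.length ≤ q
  · rwa [List.take_of_length_le hql]
  · exact List.prefix_of_prefix_length_le hp (flatten_take_prefix Bs q)
      (le_trans hq (length_flatten_take_ge hB (by omega)))

-- any nonempty k-char infix of a concatenation of ≥8-char blocks lies inside
-- (k+6)/8 + 1 consecutive blocks
theorem infix_flatten_window {Bs : List (List Char)} {t : List Char}
    (hB : ∀ b ∈ Bs, 8 ≤ b.length) (ht : t ≠ []) (h : t <:+: Bs.flatten)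
    {m : Nat} (hm : (t.length + 6) / 8 + 1 ≤ m) :
    ∃ i, t <:+: ((Bs.drop i).take m).flatten := by
  induction Bs with
  | nil =>
    simp only [List.flatten_nil] at h
    exact absurd (List.eq_nil_of_infix_nil h) ht
  | cons b rest ih =>
    obtain ⟨u, v, huv⟩ := h
    simp only [List.flatten_cons] at huv
    rw [List.append_assoc] at huv
    have hm1 : 1 ≤ m := by omega
    by_cases h1 : u.length + t.length ≤ b.length
    · -- t inside the first block
      refine ⟨0, ?_⟩
      have htb : t <:+: b := by
        have htake : u ++ t = b.take (u.length + t.length) := by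
          have := congrArg (List.take (u.length + t.length)) huv
          rw [List.take_append_of_le_length h1] at this
          rw [List.take_append, List.take_of_length_le (by omega), Nat.add_sub_cancel_left,
            List.take_append, List.take_of_length_le (le_refl _), Nat.sub_self, List.take_zero,
            List.append_nil] at this
          exact this
        exact ⟨u, b.drop (u.length + t.length), by rw [htake, List.take_append_drop]⟩
      refine htb.trans ?_
      rw [List.drop_zero, show m = (m - 1) + 1 by omega, List.take_succ_cons,
        List.flatten_cons]
      exact (List.prefix_append b _).isInfix
    · by_cases h2 : b.length ≤ u.length
      · -- t entirely inside the rest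
        have hd := congrArg (List.drop b.length) huv
        rw [List.drop_append_of_le_length h2, List.drop_append_of_le_length (le_refl _),
          List.drop_length, List.nil_append] at hd
        obtain ⟨i, hi⟩ := ih (fun x hx => hB x (by simp [hx]))
          ⟨u.drop b.length, v, by rw [List.append_assoc]; exact hd⟩
        exact ⟨i + 1, by simpa using hi⟩
      · -- t straddles the boundary of the first block
        push Not at h1 h2
        refine ⟨0, ?_⟩
        have hub : u.length ≤ b.length := by omega
        set d := b.length - u.length with hd
        have hd1 : 1 ≤ d := by omega
        have hdt : d < t.length := by omega
        have hlendrop : (b.drop u.length).length = d := by simp [hd]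
        have hdrop : t ++ v = b.drop u.length ++ rest.flatten := by
          have := congrArg (List.drop u.length) huv
          rwa [List.drop_append_of_le_length (le_refl _), List.drop_length, List.nil_append,
            List.drop_append_of_le_length hub] at this
        have ht1 : t.take d = b.drop u.length := by
          have := congrArg (List.take d) hdrop
          rw [List.take_append_of_le_length (show d ≤ t.length by omega)] at this
          rw [List.take_append_of_le_length (show d ≤ (b.drop u.length).length by omega)] at this
          rwa [List.take_of_length_le (show (b.drop u.length).length ≤ d by omega)] at this
        have ht2 : t.drop d ++ v = rest.flatten := by
          have := congrArg (List.drop d) hdrop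
          rw [List.drop_append_of_le_length (show d ≤ t.length by omega)] at this
          rw [List.drop_append_of_le_length (show d ≤ (b.drop u.length).length by omega)] at this
          rwa [List.drop_eq_nil_of_le (show (b.drop u.length).length ≤ d by omega),
            List.nil_append] at this
        have hlq : (t.drop d).length = t.length - d := List.length_drop
        set q := (t.length - d + 7) / 8 with hq
        obtain ⟨w, hw⟩ := prefix_flatten_take (fun x hx => hB x (by simp [hx]))
          (⟨v, ht2⟩ : t.drop d <+: rest.flatten) (show (t.drop d).length ≤ 8 * q by omega)
        have hqm : q + 1 ≤ m := by omega
        have hu : u = b.take u.length := by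
          have := congrArg (List.take u.length) huv
          rwa [List.take_append_of_le_length (le_refl _), List.take_length,
            List.take_append_of_le_length hub] at this
        have hwin : t <:+: (List.take (q + 1) (b :: rest)).flatten := by
          rw [List.take_succ_cons, List.flatten_cons]
          refine ⟨u, w, ?_⟩
          calc u ++ t ++ w = u ++ (t.take d ++ t.drop d) ++ w := by rw [List.take_append_drop]
            _ = (u ++ t.take d) ++ (t.drop d ++ w) := by simp only [List.append_assoc]
            _ = b ++ (rest.take q).flatten := by
                rw [hw, ht1]
                congr 1
                conv_rhs => rw [← List.take_append_drop u.length b]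
                rw [← hu]
        rw [List.drop_zero]
        refine hwin.trans (List.IsPrefix.isInfix ?_)
        rw [show List.take (q + 1) (b :: rest) = List.take (q + 1) (List.take m (b :: rest)) by
          rw [List.take_take]; congr 1; omega]
        exact flatten_take_prefix _ _

-- every genuine substring whose span fits within m blocks is found by B's membership test
theorem windowText_complete {s t : List Char} {m : Nat} (ht : t ≠ [])
    (h : t <:+: catOf s) (hm : (t.length + 6) / 8 + 1 ≤ m) :
    t <:+: windowText s m := by
  have hB : ∀ b ∈ s.map (fun c => bin08 c.toNat), 8 ≤ b.length := by
    intro b hb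
    obtain ⟨c, _, rfl⟩ := List.mem_map.1 hb
    exact bin08_length_ge _
  obtain ⟨i, hi⟩ := infix_flatten_window hB ht h hm
  rw [show ((s.map (fun c => bin08 c.toNat)).drop i).take m
      = ((s.drop i).take m).map (fun c => bin08 c.toNat) by
    rw [← List.map_drop, ← List.map_take]] at hi
  unfold windowText
  by_cases hcase : i + m ≤ s.length
  · have hgmem : (s.drop i).take m ∈ mGrams s m := by
      rw [mGrams, List.mem_map]
      exact ⟨i, List.mem_range.2 (by omega), rfl⟩
    have hpart : (((s.drop i).take m).map (fun c => bin08 c.toNat)).flatten ∈ windowParts s m := by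
      unfold windowParts
      exact List.mem_append_left _
        (List.mem_map.2 ⟨_, (PySem.List.mem_dedup _ _).2 hgmem, rfl⟩)
    exact hi.trans (infix_join_of_mem hpart)
  · have hgd : (s.drop i).take m = s.drop i :=
      List.take_of_length_le (by rw [List.length_drop]; omega)
    have hsuffix : s.drop i = (s.drop (s.length - (m - 1))).drop (i - (s.length - (m - 1))) := by
      rw [List.drop_drop]
      congr 1
      omega
    have htail : (((s.drop i).take m).map (fun c => bin08 c.toNat)).flatten
        <:+: ((s.drop (s.length - (m - 1))).map (fun c => bin08 c.toNat)).flatten := by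
      apply flatten_map_infix
      rw [hgd, hsuffix]
      exact (List.drop_suffix _ _).isInfix
    have hpart : ((s.drop (s.length - (m - 1))).map (fun c => bin08 c.toNat)).flatten
        ∈ windowParts s m := by
      unfold windowParts
      exact List.mem_append_right _ (by simp)
    exact hi.trans (htail.trans (infix_join_of_mem hpart))

theorem loopB_eq_loopA (s : List Char) (n m : Nat) : loopB s n m = loopA (catOf s) n := by
  induction n, m using loopB.induct s with
  | case1 n m hgt ih =>
    rw [loopB.eq_def, if_pos hgt]
    exact ih
  | case2 n m hle hin ih =>
    rw [loopB.eq_def, if_neg hle, dif_pos hin, ih]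
    have hA : PySem.Chars.isIn (pyBin n) (catOf s) = true := by
      rw [PySem.Chars.isIn_iff_infix]
      exact windowText_sound (pyBin_ne_nil n) (newline_not_mem_pyBin n)
        ((PySem.Chars.isIn_iff_infix _ _).1 hin)
    conv_rhs => rw [loopA.eq_def]
    rw [dif_pos hA]
  | case3 n m hle hnin =>
    rw [loopB.eq_def, if_neg hle, dif_neg hnin]
    have hA : ¬ PySem.Chars.isIn (pyBin n) (catOf s) = true := by
      intro hcontra
      apply hnin
      rw [PySem.Chars.isIn_iff_infix]
      exact windowText_complete (pyBin_ne_nil n)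
        ((PySem.Chars.isIn_iff_infix _ _).1 hcontra) (by omega)
    conv_rhs => rw [loopA.eq_def]
    rw [dif_neg hA]

theorem findLastBinary_eq_alt (s : String) : findLastBinary s = findLastBinary_alt s := by
  unfold findLastBinary findLastBinary_alt
  dsimp only
  rw [cat_eq]
  exact (loopB_eq_loopA s.toList 0 0).symm

-- ===== VERDICT (by name: the statement is the Claim_ definition above) =====
theorem findLastBinary_spec : Claim_equal_findLastBinary := by
  intro s _
  unfold Spec_findLastBinary
  exact findLastBinary_eq_alt s
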